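-- pv_equiv track=rewrite | github.com/jacques-zhang/project-packet-analyser | src/utils.py | octet_valide
-- ===== SOURCE A (Python) =====
-- def octet_valide(hex):
--     hex = hex.rstrip('\n')
--     liste = ['1', '2', '3', '4', '5', '6', '7', '8', '9', '0', 'a', 'b', 'c', 'd', 'e', 'f']
--     if len(hex) != 2:
--         return False
--     for i in range(len(hex)):
--         if hex[i].lower() not in liste:
--             return False
--     return True
-- ===== SOURCE B (Python) =====
-- # Precompute the finite set of all 484 valid octet strings (two chars, each a
-- # hex digit in either case); validation is then a single set-membership lookup.
-- _HEXCHARS = '0123456789abcdefABCDEF'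
-- _VALID = frozenset(a + b for a in _HEXCHARS for b in _HEXCHARS)
--
--
-- def octet_valide(hex):
--     return hex.rstrip('\n') in _VALID
-- ===== Notes on version B (the rewrite author's own statement) =====
-- stated objective: simpler
-- what changed: Replaces the length check plus per-character lowercase-and-list-membership loop by a precomputed table of all 484 valid two-character hex strings, so validation is a single set-membership lookup of the stripped string with no per-character logic at runtime.
import Mathlib
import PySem

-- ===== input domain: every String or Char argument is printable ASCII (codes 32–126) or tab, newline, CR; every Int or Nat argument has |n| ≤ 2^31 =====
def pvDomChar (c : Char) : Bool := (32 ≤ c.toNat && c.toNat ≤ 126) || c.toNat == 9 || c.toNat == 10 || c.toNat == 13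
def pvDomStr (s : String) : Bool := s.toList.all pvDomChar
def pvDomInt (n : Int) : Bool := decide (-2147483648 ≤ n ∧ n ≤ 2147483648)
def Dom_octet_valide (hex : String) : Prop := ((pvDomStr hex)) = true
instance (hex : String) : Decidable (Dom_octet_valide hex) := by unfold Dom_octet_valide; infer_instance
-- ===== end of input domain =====

-- B replaces A's length check and per-character lowercase/list-membership loop by a
-- single membership lookup of the stripped string in a precomputed table of all 484
-- valid two-character hex strings (objective: simpler).

-- shared transliteration of hex.rstrip('\n') (exact: removes exactly the trailing '\n' characters)
def rstripNl (s : List Char) : List Char := (s.reverse.dropWhile (fun c => c == '\n')).reverse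

-- ===== PORT A =====
-- the literal `liste` of A
def hexListe : List Char :=
  ['1', '2', '3', '4', '5', '6', '7', '8', '9', '0', 'a', 'b', 'c', 'd', 'e', 'f']

-- the 'for i in range(len(hex))' loop with its early 'return False'
def octetLoopA : List Char → Bool
  | [] => true
  | c :: rest =>
    if hexListe.contains (PySem.Chars.lowerChar c) = false then false else octetLoopA rest

def octet_valide (hex : String) : Bool :=
  let h := rstripNl hex.toList
  if h.length ≠ 2 then false
  else octetLoopA h

-- ===== PORT B =====
-- _HEXCHARS = '0123456789abcdefABCDEF'
def hexChars : List Char :=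
  ['0', '1', '2', '3', '4', '5', '6', '7', '8', '9',
   'a', 'b', 'c', 'd', 'e', 'f', 'A', 'B', 'C', 'D', 'E', 'F']

-- _VALID = frozenset(a + b for a in _HEXCHARS for b in _HEXCHARS)
def validOctets : List (List Char) := hexChars.flatMap (fun a => hexChars.map (fun b => [a, b]))

def octet_valide_alt (hex : String) : Bool := validOctets.contains (rstripNl hex.toList)

-- ===== PRECONDITION & SPEC =====
def Spec_octet_valide (hex : String) (out : Bool) : Prop := out = octet_valide_alt hex
instance (hex : String) (out : Bool) : Decidable (Spec_octet_valide hex out) := by unfold Spec_octet_valide; infer_instance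

-- ===== CLAIM (what is proved, stated in full; the proofs are below) =====
def Claim_equal_octet_valide : Prop := ∀ (hex : String), Dom_octet_valide hex → Spec_octet_valide hex (octet_valide hex)

-- ===== LEMMAS AND PROOFS =====

theorem char_le_iff_toNat (a b : Char) : a ≤ b ↔ a.toNat ≤ b.toNat := by
  rw [Char.le_def, UInt32.le_iff_toNat_le]
  exact Iff.rfl

-- membership in the product table = per-component membership in hexChars
theorem mem_validOctets (l : List Char) :
    validOctets.contains l = true ↔ ∃ a b, l = [a, b] ∧ a ∈ hexChars ∧ b ∈ hexChars := by
  simp only [validOctets, List.contains_iff_mem, List.mem_flatMap, List.mem_map]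
  constructor
  · rintro ⟨a, ha, b, hb, rfl⟩; exact ⟨a, b, rfl, ha, hb⟩
  · rintro ⟨a, b, rfl, ha, hb⟩; exact ⟨a, ha, b, hb, rfl⟩

-- per-character agreement: A's membership test on the lowercased char = B's alphabet
theorem contains_lower_eq_mem (c : Char) :
    hexListe.contains (PySem.Chars.lowerChar c) = hexChars.contains c := by
  have lA : 'A'.toNat = 65 := rfl
  have lZ : 'Z'.toNat = 90 := rfl
  by_cases hu : PySem.Chars.isupper c = true
  · have hb : 65 ≤ c.toNat ∧ c.toNat ≤ 90 := by
      simp only [PySem.Chars.isupper, Bool.and_eq_true, decide_eq_true_eq,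
        char_le_iff_toNat, lA, lZ] at hu
      exact hu
    obtain ⟨h1, h2⟩ := hb
    interval_cases hd : c.toNat <;> (rw [← Char.ofNat_toNat c, hd]) <;> decide
  · have hc : PySem.Chars.lowerChar c = c := by
      simp [PySem.Chars.lowerChar, hu]
    rw [hc, Bool.eq_iff_iff]
    simp only [hexListe, hexChars, List.contains_cons, List.contains_nil, Bool.or_eq_true,
      beq_iff_eq]
    constructor
    · rintro (rfl | rfl | rfl | rfl | rfl | rfl | rfl | rfl | rfl | rfl | rfl | rfl | rfl |
        rfl | rfl | rfl | h') <;> first | decide | exact (Bool.false_ne_true h').elim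
    · rintro (rfl | rfl | rfl | rfl | rfl | rfl | rfl | rfl | rfl | rfl | rfl | rfl | rfl |
        rfl | rfl | rfl | rfl | rfl | rfl | rfl | rfl | rfl | h') <;>
        first | decide | exact absurd (by decide) hu | exact (Bool.false_ne_true h').elim

theorem octet_valide_spec : Claim_equal_octet_valide := by
  intro hex _
  unfold Spec_octet_valide octet_valide octet_valide_alt
  have notmem : ∀ (l : List Char), l.length ≠ 2 → validOctets.contains l = false := by
    intro l hl
    cases hm : validOctets.contains l
    · rfl
    · obtain ⟨x, y, hab, -, -⟩ := (mem_validOctets _).mp hm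
      exact absurd (by rw [hab]; rfl) hl
  cases h : rstripNl hex.toList with
  | nil =>
    rw [notmem [] (by decide)]
    simp
  | cons a t =>
    cases t with
    | nil =>
      rw [notmem [a] (by simp)]
      simp
    | cons b t2 =>
      cases t2 with
      | nil =>
        simp only [List.length_cons, List.length_nil]
        split_ifs with hif
        · omega
        simp only [octetLoopA, contains_lower_eq_mem]
        rw [Bool.eq_iff_iff, mem_validOctets]
        constructor
        · intro hl
          simp at hl
          exact ⟨a, b, rfl, hl.1, hl.2⟩
        · rintro ⟨x, y, hxy, hx, hy⟩
          obtain ⟨rfl, rfl⟩ : a = x ∧ b = y := by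
            injection hxy with h1 h2; injection h2 with h2 _; exact ⟨h1, h2⟩
          simp [hx, hy]
      | cons c t3 =>
        rw [notmem (a :: b :: c :: t3) (by simp only [List.length_cons]; omega)]
        simp only [List.length_cons]
        split_ifs with hif
        · rfl
        · omega
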